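-- pv_equiv track=rewrite | github.com/iamseungpil/arc-agi-3-symbolica-bestiary | research_extensions/modules/dreamcoder.py | _next_action_from_plan
-- ===== SOURCE A (Python) =====
-- def _next_action_from_plan(
--     plan: list[str], recent: list[str], available_actions: list[str]
-- ) -> tuple[str | None, int]:
--     filtered = [token for token in plan if token in available_actions]
--     if not filtered:
--         return None, 0
--     # If the recent trajectory already completed the whole local plan,
--     # do not immediately restart the same exact spine from the top.
--     if len(recent) >= len(filtered) and recent[-len(filtered) :] == filtered:
--         return None, len(filtered)
--     max_progress = min(len(filtered) - 1, len(recent))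
--     for progress in range(max_progress, 0, -1):
--         if recent[-progress:] == filtered[:progress]:
--             return filtered[progress], progress
--     return filtered[0], 0
-- ===== SOURCE B (Python) =====
-- def _next_action_from_plan(plan, recent, available_actions):
--     avail = set(available_actions)
--     filtered = [token for token in plan if token in avail]
--     if not filtered:
--         return None, 0
--     # KMP failure function over filtered + [sep] + recent: its final value is the
--     # length of the longest suffix of recent that equals a prefix of filtered.
--     sep = object()  # equal to nothing else, so no border can straddle it
--     s = filtered + [sep] + recent
--     pi = [0]
--     k = 0
--     for i in range(1, len(s)):
--         while k > 0 and s[i] != s[k]: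
--             k = pi[k - 1]
--         if s[i] == s[k]:
--             k += 1
--         pi.append(k)
--     if k == len(filtered):
--         return None, len(filtered)
--     if k > 0:
--         return filtered[k], k
--     return filtered[0], 0
-- ===== Notes on version B (the rewrite author's own statement) =====
-- stated objective: faster
-- what changed: Replaces A's descending per-length slice comparison (quadratic) by one KMP failure-function pass over filtered + [sentinel] + recent, whose final value is the longest suffix of recent matching a prefix of filtered; the full-plan special case falls out as that value equalling len(filtered).
import Mathlib
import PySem

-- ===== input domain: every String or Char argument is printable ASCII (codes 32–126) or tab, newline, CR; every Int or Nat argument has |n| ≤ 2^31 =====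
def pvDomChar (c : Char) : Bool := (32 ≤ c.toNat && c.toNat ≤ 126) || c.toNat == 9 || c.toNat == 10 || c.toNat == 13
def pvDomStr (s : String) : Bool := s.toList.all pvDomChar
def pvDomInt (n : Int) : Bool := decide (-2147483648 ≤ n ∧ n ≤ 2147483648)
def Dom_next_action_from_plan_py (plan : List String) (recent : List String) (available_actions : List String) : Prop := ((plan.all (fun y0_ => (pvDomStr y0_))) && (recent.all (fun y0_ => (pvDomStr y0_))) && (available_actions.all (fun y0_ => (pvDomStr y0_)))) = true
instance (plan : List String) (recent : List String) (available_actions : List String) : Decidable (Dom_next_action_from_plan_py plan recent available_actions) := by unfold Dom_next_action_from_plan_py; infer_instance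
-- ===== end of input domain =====

-- B replaces A's quadratic descending slice-comparison scan by a single KMP
-- failure-function pass over filtered ++ [sentinel] ++ recent (asymptotically faster).

-- ===== PORT A =====
-- the for-loop 'for progress in range(max_progress, 0, -1)': p+1 is the current 'progress'
def pvALoop (filtered recent : List String) : Nat → Option String × Int
  | 0 => (PySem.List.pyGet? filtered 0, 0)        -- 'return filtered[0], 0'
  | p + 1 =>
    if PySem.List.slice recent (some (-((p : Int) + 1))) none
        = PySem.List.slice filtered none (some ((p : Int) + 1)) then
      (PySem.List.pyGet? filtered ((p : Int) + 1), (p : Int) + 1)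
    else pvALoop filtered recent p

def next_action_from_plan_py (plan : List String) (recent : List String) (available_actions : List String) : Option String × Int :=
  let filtered := plan.filter (fun token => available_actions.contains token)
  if filtered = [] then (none, 0)
  else if filtered.length ≤ recent.length ∧
      PySem.List.slice recent (some (-(filtered.length : Int))) none = filtered then
    (none, (filtered.length : Int))
  else
    pvALoop filtered recent (min (filtered.length - 1) recent.length)

-- ===== PORT B =====
-- the sentinel object() is modelled as 'none'; plan tokens become 'some tok' (exact:
-- object() compares equal to nothing else, as 'none' does among these elements).
-- 'while k > 0 and s[i] != s[k]: k = pi[k-1]'; the 'min (…) (k-1)' is a termination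
-- guard only: pi[k-1] ≤ k-1 always holds at run time (proved below), so it is exact.
def pvFall (s : List (Option String)) (pi : List Nat) (c : Option String) (k : Nat) : Nat :=
  if _h : k ≠ 0 ∧ s.getD k none ≠ c then
    pvFall s pi c (min (pi.getD (k - 1) 0) (k - 1))
  else k
termination_by k
decreasing_by exact Nat.lt_of_le_of_lt (Nat.min_le_right _ _) (by omega)

-- 'for i in range(1, len(s)): …'; returns the final k (= pi[-1])
def pvKmp (s : List (Option String)) (i : Nat) (pi : List Nat) (k : Nat) : Nat :=
  if h : i < s.length then
    let k1 := pvFall s pi (s.getD i none) k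
    let k2 := if s.getD i none = s.getD k1 none then k1 + 1 else k1
    pvKmp s (i + 1) (pi ++ [k2]) k2
  else k
termination_by s.length - i

def next_action_from_plan_py_alt (plan : List String) (recent : List String) (available_actions : List String) : Option String × Int :=
  let avail := PySem.Set.ofList available_actions
  let filtered := plan.filter (fun token => PySem.Set.contains avail token)
  if filtered = [] then (none, 0)
  else
    let s := filtered.map some ++ [none] ++ recent.map some
    let k := pvKmp s 1 [0] 0
    if k = filtered.length then (none, (filtered.length : Int))
    else if 0 < k then (PySem.List.pyGet? filtered (k : Int), (k : Int))
    else (PySem.List.pyGet? filtered 0, 0)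

-- ===== PRECONDITION & SPEC =====
def Spec_next_action_from_plan_py (plan : List String) (recent : List String) (available_actions : List String) (out : Option String × Int) : Prop := out = next_action_from_plan_py_alt plan recent available_actions
instance (plan : List String) (recent : List String) (available_actions : List String) (out : Option String × Int) : Decidable (Spec_next_action_from_plan_py plan recent available_actions out) := by unfold Spec_next_action_from_plan_py; infer_instance

-- ===== CLAIM (what is proved, stated in full; the proofs are below) =====
def Claim_equal_next_action_from_plan_py : Prop := ∀ (plan : List String) (recent : List String) (available_actions : List String), Dom_next_action_from_plan_py plan recent available_actions → Spec_next_action_from_plan_py plan recent available_actions (next_action_from_plan_py plan recent available_actions)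

-- ===== LEMMAS AND PROOFS =====

-- longest proper border (prefix = suffix) of t; what the failure function computes
def pvMB (t : List (Option String)) : Nat :=
  Nat.findGreatest (fun p => t.take p = t.drop (t.length - p)) (t.length - 1)

def pvBord (t : List (Option String)) (p : Nat) : Prop :=
  p ≤ t.length ∧ t.take p = t.drop (t.length - p)

-- the brute-force answer: longest j with recent-suffix j = filtered-prefix j
def pvK (f r : List String) : Nat :=
  Nat.findGreatest (fun j => r.drop (r.length - j) = f.take j) (min f.length r.length)

lemma pvBord_suffix {t : List (Option String)} {p : Nat} (h : pvBord t p) :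
    t.take p <:+ t := by
  rw [h.2]; exact List.drop_suffix _ _

lemma pvSuffix_eq_drop {u t : List (Option String)} (h : u <:+ t) :
    u = t.drop (t.length - u.length) := by
  obtain ⟨v, rfl⟩ := h
  simp

lemma pvBord_of_suffix {t : List (Option String)} {p : Nat} (hp : p ≤ t.length)
    (h : t.take p <:+ t) : pvBord t p := by
  refine ⟨hp, ?_⟩
  have := pvSuffix_eq_drop h
  rwa [List.length_take, Nat.min_eq_left hp] at this

lemma pvSuffix_of_suffix {u w t : List (Option String)} (hu : u <:+ t) (hw : w <:+ t)
    (hl : u.length ≤ w.length) : u <:+ w := by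
  rw [← List.reverse_prefix] at hu hw ⊢
  exact List.prefix_of_prefix_length_le hu hw (by simpa using hl)

-- K2: a shorter border is a border of a longer border
lemma pvBord_take {t : List (Option String)} {p q : Nat} (h1 : pvBord t p)
    (h2 : pvBord t q) (hq : q ≤ p) : pvBord (t.take p) q := by
  have hsfx : t.take q <:+ t.take p :=
    pvSuffix_of_suffix (pvBord_suffix h2) (pvBord_suffix h1)
      (by have := h2.1; simp [List.length_take]; omega)
  have htq : (t.take p).take q = t.take q := by
    rw [List.take_take, Nat.min_eq_left hq]
  apply pvBord_of_suffix (by have := h2.1; simp [List.length_take]; omega)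
  rwa [htq]

-- K3: a border of a border is a border
lemma pvBord_trans {t : List (Option String)} {p q : Nat} (h1 : pvBord t p)
    (h2 : pvBord (t.take p) q) : pvBord t q := by
  have hq : q ≤ p := by have := h2.1; simp [List.length_take] at this; omega
  have htq : (t.take p).take q = t.take q := by
    rw [List.take_take, Nat.min_eq_left hq]
  apply pvBord_of_suffix (le_trans hq h1.1)
  have : t.take q <:+ t.take p := by rw [← htq]; exact pvBord_suffix h2
  exact this.trans (pvBord_suffix h1)

lemma pvTake_getD {s : List (Option String)} {i k : Nat} (hk : k < i) :
    (s.take i).getD k none = s.getD k none := by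
  simp [List.getD_eq_getElem?_getD, hk]

lemma pvTake_succ {s : List (Option String)} {i : Nat} (hi : i < s.length) :
    s.take (i + 1) = s.take i ++ [s.getD i none] := by
  rw [List.take_add_one, List.getElem?_eq_getElem hi, List.getD_eq_getElem s none hi]
  rfl

-- K4: extension of a border by one matching element
lemma pvBord_ext {u : List (Option String)} {c : Option String} {p : Nat}
    (hp : p < u.length) :
    pvBord (u ++ [c]) (p + 1) ↔ (pvBord u p ∧ u.getD p none = c) := by
  have hlen : (u ++ [c]).length = u.length + 1 := by simp
  have htake : (u ++ [c]).take (p + 1) = u.take p ++ [u.getD p none] := by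
    rw [List.take_append_of_le_length (show p + 1 ≤ u.length by omega), pvTake_succ hp]
  have hdrop : (u ++ [c]).drop ((u ++ [c]).length - (p + 1)) =
      u.drop (u.length - p) ++ [c] := by
    have h1 : (u ++ [c]).length - (p + 1) = u.length - p := by rw [hlen]; omega
    rw [h1, List.drop_append_of_le_length (by omega)]
  constructor
  · rintro ⟨-, h⟩
    rw [htake, hdrop] at h
    have := List.append_inj' h (by rfl)
    refine ⟨⟨le_of_lt hp, ?_⟩, ?_⟩
    · exact this.1
    · simpa using this.2
  · rintro ⟨⟨-, h⟩, hc⟩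
    refine ⟨by omega, ?_⟩
    rw [htake, hdrop, h, hc]

lemma pvMB_bord (t : List (Option String)) : pvBord t (pvMB t) := by
  unfold pvBord pvMB
  refine ⟨le_trans (Nat.findGreatest_le _) (by omega), ?_⟩
  exact Nat.findGreatest_spec (P := fun p => t.take p = t.drop (t.length - p))
    (Nat.zero_le _) (by simp)

lemma pvMB_le (t : List (Option String)) : pvMB t ≤ t.length - 1 :=
  Nat.findGreatest_le _

lemma le_pvMB {t : List (Option String)} {p : Nat} (hp : p ≤ t.length - 1)
    (h : pvBord t p) : p ≤ pvMB t :=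
  Nat.le_findGreatest hp h.2

-- the while-loop: starting from a border k0 of u := s.take i below which nothing
-- matching c := s[i] was skipped, the step computes the longest proper border of
-- s.take (i+1)
lemma pvFall_step (s : List (Option String)) (pi : List Nat) (i : Nat)
    (hi1 : 1 ≤ i) (hil : i < s.length)
    (hpi : ∀ j, j < i → pi.getD j 0 = pvMB (s.take (j + 1))) :
    ∀ k0, pvBord (s.take i) k0 → k0 < i →
      (∀ p, k0 < p → p < i → pvBord (s.take i) p →
        s.getD p none ≠ s.getD i none) →
      (if s.getD i none = s.getD (pvFall s pi (s.getD i none) k0) none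
        then pvFall s pi (s.getD i none) k0 + 1
        else pvFall s pi (s.getD i none) k0) = pvMB (s.take (i + 1)) := by
  intro k0
  induction k0 using Nat.strong_induction_on with
  | _ k0 IH =>
  intro hb hk0 hinv
  have hulen : (s.take i).length = i := by rw [List.length_take]; omega
  have hl1 : (s.take (i + 1)).length = i + 1 := by rw [List.length_take]; omega
  have ht : s.take (i + 1) = s.take i ++ [s.getD i none] := pvTake_succ hil
  rw [pvFall]
  by_cases hcond : k0 ≠ 0 ∧ s.getD k0 none ≠ s.getD i none
  · rw [dif_pos (show k0 ≠ 0 ∧ s.getD k0 none ≠ s.getD i none from hcond)]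
    have hk01 : 1 ≤ k0 := Nat.one_le_iff_ne_zero.mpr hcond.1
    have hpik : pi.getD (k0 - 1) 0 = pvMB (s.take k0) := by
      have := hpi (k0 - 1) (by omega)
      rwa [Nat.sub_add_cancel hk01] at this
    have hk0len : (s.take k0).length = k0 := by rw [List.length_take]; omega
    have hmble : pvMB (s.take k0) ≤ k0 - 1 := by
      have := pvMB_le (s.take k0); omega
    have hmin : min (pi.getD (k0 - 1) 0) (k0 - 1) = pvMB (s.take k0) := by
      rw [hpik]; omega
    rw [hmin]
    have htk : s.take k0 = (s.take i).take k0 := by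
      rw [List.take_take, Nat.min_eq_left (by omega)]
    have hbm : pvBord (s.take i) (pvMB (s.take k0)) := by
      apply pvBord_trans hb
      rw [← htk]; exact pvMB_bord (s.take k0)
    refine IH (pvMB (s.take k0)) (by omega) hbm (by omega) ?_
    intro p hp1 hp2 hp3
    rcases lt_trichotomy p k0 with h | h | h
    · exfalso
      have hpb : pvBord ((s.take i).take k0) p := pvBord_take hb hp3 (by omega)
      rw [← htk] at hpb
      have : p ≤ pvMB (s.take k0) := le_pvMB (by omega) hpb
      omega
    · subst h; exact hcond.2
    · exact hinv p h hp2 hp3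
  · rw [dif_neg hcond]
    by_cases hcc : s.getD i none = s.getD k0 none
    · rw [if_pos hcc]
      have hgd : (s.take i).getD k0 none = s.getD i none := by
        rw [pvTake_getD hk0]; exact hcc.symm
      have hb1 : pvBord (s.take (i + 1)) (k0 + 1) := by
        rw [ht]; exact (pvBord_ext (by omega)).mpr ⟨hb, hgd⟩
      have hle : k0 + 1 ≤ pvMB (s.take (i + 1)) := le_pvMB (by omega) hb1
      have hge : pvMB (s.take (i + 1)) ≤ k0 + 1 := by
        by_contra hlt
        rw [not_le] at hlt
        have hmb := pvMB_bord (s.take (i + 1))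
        have hmle : pvMB (s.take (i + 1)) ≤ i := by
          have := pvMB_le (s.take (i + 1)); omega
        obtain ⟨q, hq⟩ : ∃ q, pvMB (s.take (i + 1)) = q + 1 := ⟨pvMB (s.take (i + 1)) - 1, by omega⟩
        rw [hq, ht] at hmb
        have hqe := (pvBord_ext (by omega : q < (s.take i).length)).mp hmb
        refine hinv q (by omega) (by omega) hqe.1 ?_
        rw [← pvTake_getD (show q < i by omega)]; exact hqe.2
      omega
    · rw [if_neg hcc]
      have hk00 : k0 = 0 := by
        rcases not_and_or.mp hcond with h | h
        · omega
        · exact absurd (not_not.mp h).symm hcc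
      subst hk00
      symm
      rw [pvMB, Nat.findGreatest_eq_zero_iff]
      intro n hn0 hnle hP
      have hbord : pvBord (s.take (i + 1)) n := ⟨by omega, hP⟩
      obtain ⟨q, hq⟩ : ∃ q, n = q + 1 := ⟨n - 1, by omega⟩
      rw [hq, ht] at hbord
      have hqe := (pvBord_ext (by omega : q < (s.take i).length)).mp hbord
      have hqc : s.getD q none = s.getD i none := by
        rw [← pvTake_getD (show q < i by omega)]; exact hqe.2
      rcases Nat.eq_zero_or_pos q with h0 | h0
      · subst h0; exact hcc hqc.symm
      · exact hinv q h0 (by omega) hqe.1 hqc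

lemma pvKmp_eq (s : List (Option String)) :
    ∀ fuel i pi k, s.length - i ≤ fuel → 1 ≤ i → pi.length = i →
      (∀ j, j < i → pi.getD j 0 = pvMB (s.take (j + 1))) →
      k = pvMB (s.take i) → pvKmp s i pi k = pvMB s := by
  intro fuel
  induction fuel with
  | zero =>
    intro i pi k hfuel hi hlen hinv hk
    rw [pvKmp, dif_neg (by omega : ¬ i < s.length), hk,
      List.take_of_length_le (by omega)]
  | succ fuel IHf =>
    intro i pi k hfuel hi hlen hinv hk
    rw [pvKmp]
    by_cases hil : i < s.length
    · rw [dif_pos hil]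
      have hulen : (s.take i).length = i := by rw [List.length_take]; omega
      have hk2 : (if s.getD i none = s.getD (pvFall s pi (s.getD i none) k) none
          then pvFall s pi (s.getD i none) k + 1
          else pvFall s pi (s.getD i none) k) = pvMB (s.take (i + 1)) := by
        refine pvFall_step s pi i hi hil hinv k (hk ▸ pvMB_bord (s.take i)) ?_ ?_
        · have := pvMB_le (s.take i); omega
        · intro p hp1 hp2 hp3
          exact absurd (hk ▸ le_pvMB (by omega) hp3) (by omega)
      refine IHf (i + 1) _ _ (by omega) (by omega) (by simp [hlen]) ?_ hk2
      intro j hj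
      rcases Nat.lt_or_ge j i with hji | hji
      · rw [List.getD_append _ _ _ _ (by omega), hinv j hji]
      · have hji' : j = i := by omega
        subst hji'
        rw [List.getD_eq_getElem?_getD, List.getElem?_append_right (by omega),
          hlen, Nat.sub_self]
        simpa using hk2
    · rw [dif_neg hil, hk, List.take_of_length_le (by omega)]

-- the separator: borders of f.map some ++ [none] ++ r.map some are exactly the
-- suffix-of-r = prefix-of-f overlaps
lemma pvSepNone (f r : List String) {j : Nat}
    (h : (f.map some ++ [none] ++ r.map some)[j]? = some none) : j = f.length := by
  by_contra hne
  rcases Nat.lt_or_ge j f.length with hj | hj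
  · rw [List.getElem?_append_left (by simp; omega),
      List.getElem?_append_left (by simp; omega), List.getElem?_map] at h
    rcases Nat.lt_or_ge j f.length with h2 | h2
    · rw [List.getElem?_eq_getElem (by simpa using h2)] at h
      simp at h
    · omega
  · have hj' : f.length + 1 ≤ j := by omega
    rw [List.getElem?_append_right (by simp; omega), List.getElem?_map] at h
    rcases Nat.lt_or_ge (j - (f.length + 1)) r.length with h2 | h2
    · rw [List.getElem?_eq_getElem (by simpa using h2)] at h
      simp at h
    · rw [List.getElem?_eq_none (by simpa using h2)] at h
      simp at h

lemma pvSepLen (f r : List String) :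
    (f.map some ++ [none] ++ r.map some).length = f.length + 1 + r.length := by
  simp; omega

lemma pvSepTake (f r : List String) {p : Nat} (hp : p ≤ f.length) :
    (f.map some ++ [none] ++ r.map some).take p = (f.take p).map some := by
  rw [List.take_append_of_le_length (by simp; omega),
    List.take_append_of_le_length (by simp; omega), List.map_take]

lemma pvSepDrop (f r : List String) {p : Nat} (hp : p ≤ r.length) :
    (f.map some ++ [none] ++ r.map some).drop
        ((f.map some ++ [none] ++ r.map some).length - p)
      = (r.drop (r.length - p)).map some := by
  rw [pvSepLen]
  have h1 : f.length + 1 + r.length - p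
      = (f.map some ++ [none]).length + (r.length - p) := by simp; omega
  rw [h1, List.drop_append]
  rw [List.drop_of_length_le (by omega), Nat.add_sub_cancel_left, List.map_drop]
  simp

lemma pvSep_iff (f r : List String) {p : Nat}
    (hple : p ≤ (f.map some ++ [none] ++ r.map some).length - 1) :
    ((f.map some ++ [none] ++ r.map some).take p
        = (f.map some ++ [none] ++ r.map some).drop
            ((f.map some ++ [none] ++ r.map some).length - p))
      ↔ (p ≤ f.length ∧ p ≤ r.length ∧ r.drop (r.length - p) = f.take p) := by
  have hslen := pvSepLen f r
  constructor
  · intro h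
    have hpf : p ≤ f.length := by
      by_contra hpf
      have he : ((f.map some ++ [none] ++ r.map some).take p)[f.length]?
          = ((f.map some ++ [none] ++ r.map some).drop
              ((f.map some ++ [none] ++ r.map some).length - p))[f.length]? := by
        rw [h]
      rw [List.getElem?_take, if_pos (by omega), List.getElem?_drop] at he
      have hL : ((f.map some ++ [none] ++ r.map some))[f.length]? = some none := by
        rw [List.getElem?_append_left (by simp),
          List.getElem?_append_right (by simp), List.length_map, Nat.sub_self]
        rfl
      rw [hL] at he
      have := pvSepNone f r he.symm
      omega
    have hpr : p ≤ r.length := by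
      by_contra hpr
      have he : ((f.map some ++ [none] ++ r.map some).take p)[p - r.length - 1]?
          = ((f.map some ++ [none] ++ r.map some).drop
              ((f.map some ++ [none] ++ r.map some).length - p))[p - r.length - 1]? := by
        rw [h]
      rw [List.getElem?_take, if_pos (by omega), List.getElem?_drop] at he
      have h2 : (f.map some ++ [none] ++ r.map some).length - p + (p - r.length - 1)
          = f.length := by omega
      rw [h2] at he
      have hL : ((f.map some ++ [none] ++ r.map some))[f.length]? = some none := by
        rw [List.getElem?_append_left (by simp),
          List.getElem?_append_right (by simp), List.length_map, Nat.sub_self]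
        rfl
      rw [hL] at he
      have := pvSepNone f r he
      omega
    refine ⟨hpf, hpr, ?_⟩
    rw [pvSepTake f r hpf, pvSepDrop f r hpr] at h
    exact (List.map_injective_iff.mpr (Option.some_injective _) h).symm
  · rintro ⟨hpf, hpr, h⟩
    rw [pvSepTake f r hpf, pvSepDrop f r hpr, h]

lemma pvSep (f r : List String) :
    pvMB (f.map some ++ [none] ++ r.map some) = pvK f r := by
  have hslen := pvSepLen f r
  apply Nat.le_antisymm
  · have hb := pvMB_bord (f.map some ++ [none] ++ r.map some)
    have hle := pvMB_le (f.map some ++ [none] ++ r.map some)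
    obtain ⟨h1, h2, h3⟩ := (pvSep_iff f r hle).mp hb.2
    exact Nat.le_findGreatest (by omega) h3
  · have hkle : pvK f r ≤ min f.length r.length := Nat.findGreatest_le _
    have hP : r.drop (r.length - pvK f r) = f.take (pvK f r) :=
      Nat.findGreatest_spec (P := fun j => r.drop (r.length - j) = f.take j)
        (Nat.zero_le _) (by simp)
    refine le_pvMB (by omega) ⟨by omega, ?_⟩
    exact (pvSep_iff f r (by omega)).mpr ⟨by omega, by omega, hP⟩

lemma pvALoop_eq (f r : List String) :
    ∀ p, pvALoop f r p =
      ((PySem.List.pyGet? f ((Nat.findGreatest (fun j => r.drop (r.length - j) = f.take j) p : Nat) : Int)),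
       ((Nat.findGreatest (fun j => r.drop (r.length - j) = f.take j) p : Nat) : Int)) := by
  intro p
  induction p with
  | zero => rw [pvALoop]; rfl
  | succ p IH =>
    rw [pvALoop]
    have hs1 : PySem.List.slice r (some (-((p : Int) + 1))) none
        = r.drop (r.length - (p + 1)) := by
      have := PySem.List.slice_from_neg_natCast (xs := r) (k := p + 1) (by omega)
      push_cast at this
      exact this
    have hs2 : PySem.List.slice f none (some ((p : Int) + 1)) = f.take (p + 1) := by
      have := PySem.List.slice_to_natCast (xs := f) (b := p + 1)
      push_cast at this
      exact this
    rw [hs1, hs2, Nat.findGreatest_succ]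
    split_ifs with h
    · push_cast; rfl
    · exact IH

-- ===== VERDICT (by name: the statement is the Claim_ definition above) =====
lemma pvContains (av : List String) (x : String) :
    PySem.Set.contains (PySem.Set.ofList av) x = av.contains x := by
  rw [Bool.eq_iff_iff]
  simp [PySem.Set.mem_ofList]

lemma pvKmpInit (f r : List String) :
    pvKmp (f.map some ++ [none] ++ r.map some) 1 [0] 0 = pvK f r := by
  have h1 : ∀ t : List (Option String), pvMB (t.take 1) = 0 := by
    intro t
    unfold pvMB
    have : (t.take 1).length - 1 = 0 := by rw [List.length_take]; omega
    rw [this, Nat.findGreatest_zero]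
  rw [pvKmp_eq (f.map some ++ [none] ++ r.map some)
      (f.map some ++ [none] ++ r.map some).length 1 [0] 0 (by omega) le_rfl rfl
      (by intro j hj; have : j = 0 := by omega
          subst this; exact (h1 _).symm)
      (h1 _).symm]
  exact pvSep f r

lemma pvFull_iff (f r : List String) (hf : f ≠ []) :
    (f.length ≤ r.length ∧
        PySem.List.slice r (some (-(f.length : Int))) none = f)
      ↔ pvK f r = f.length := by
  have hflen : 0 < f.length := List.length_pos_iff.mpr hf
  have hs : PySem.List.slice r (some (-(f.length : Int))) none
      = r.drop (r.length - f.length) :=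
    PySem.List.slice_from_neg_natCast (xs := r) (k := f.length) hflen
  have hKmin : pvK f r ≤ min f.length r.length := Nat.findGreatest_le _
  rw [hs]
  constructor
  · rintro ⟨hle, heq⟩
    have hP : r.drop (r.length - f.length) = f.take f.length := by
      rw [heq, List.take_length]
    have h2 : f.length ≤ pvK f r := by
      unfold pvK
      exact Nat.le_findGreatest (n := min f.length r.length)
        (P := fun j => r.drop (r.length - j) = f.take j) (by omega) hP
    omega
  · intro hK
    have hP : r.drop (r.length - pvK f r) = f.take (pvK f r) :=
      Nat.findGreatest_spec (P := fun j => r.drop (r.length - j) = f.take j)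
        (Nat.zero_le _) (by simp)
    rw [hK, List.take_length] at hP
    exact ⟨by omega, hP⟩

theorem next_action_from_plan_py_spec : Claim_equal_next_action_from_plan_py := by
  intro plan recent av _
  unfold Spec_next_action_from_plan_py next_action_from_plan_py
    next_action_from_plan_py_alt
  simp only [pvContains]
  by_cases hf : plan.filter (fun token => av.contains token) = []
  · simp only [if_pos hf]
  · simp only [if_neg hf]
    rw [pvKmpInit]
    by_cases hC : pvK (plan.filter (fun token => av.contains token)) recent
        = (plan.filter (fun token => av.contains token)).length
    · rw [if_pos ((pvFull_iff _ _ hf).mpr hC), if_pos hC]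
    · rw [if_neg (fun h => hC ((pvFull_iff _ _ hf).mp h)), if_neg hC]
      rw [pvALoop_eq]
      have hKmin : pvK (plan.filter (fun token => av.contains token)) recent
          ≤ min (plan.filter (fun token => av.contains token)).length recent.length :=
        Nat.findGreatest_le _
      have hP : ∀ q, (fun j => recent.drop (recent.length - j)
            = (plan.filter (fun token => av.contains token)).take j)
          (Nat.findGreatest (fun j => recent.drop (recent.length - j)
            = (plan.filter (fun token => av.contains token)).take j) q) := by
        intro q
        have hP0 : recent.drop (recent.length - 0)
            = (plan.filter (fun token => av.contains token)).take 0 := by simp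
        exact Nat.findGreatest_spec (P := fun j => recent.drop (recent.length - j)
          = (plan.filter (fun token => av.contains token)).take j) (Nat.zero_le _) hP0
      have hKK : Nat.findGreatest (fun j => recent.drop (recent.length - j)
            = (plan.filter (fun token => av.contains token)).take j)
            (min ((plan.filter (fun token => av.contains token)).length - 1)
              recent.length)
          = pvK (plan.filter (fun token => av.contains token)) recent := by
        apply Nat.le_antisymm
        · exact Nat.le_findGreatest
            (le_trans (Nat.findGreatest_le _) (by omega)) (hP _)
        · exact Nat.le_findGreatest (by unfold pvK at hC hKmin ⊢; omega) (hP _)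
      rw [hKK]
      by_cases h0 : 0 < pvK (plan.filter (fun token => av.contains token)) recent
      · rw [if_pos h0]
      · rw [if_neg h0]
        have : pvK (plan.filter (fun token => av.contains token)) recent = 0 := by
          omega
        rw [this]
        norm_num
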